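-- pv_equiv track=rewrite | github.com/teyter/bioinfo | rosalind/lib/minmax.py | bagmin2
-- ===== SOURCE A (Python) =====
-- def bagmin2(tli):
--     ret = []
--     currentMin = min(tli)[0]
--     for i in range(len(tli)):
--         score = tli[i][0]
--         item = tli[i][1]
--         allt = tli[i] # debug, sja nr og item
--         if currentMin == score:
--             ret.append(allt)
--     return ret
-- ===== SOURCE B (Python) =====
-- def bagmin2(tli):
--     # one pass: running minimum score and the matching tuples maintained together
--     if not tli:
--         raise ValueError("min() arg is an empty sequence")
--     best = None
--     result = []
--     for t in tli:
--         s = t[0]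
--         if best is None or s < best:
--             best = s
--             result = [t]
--         elif s == best:
--             result.append(t)
--     return result
-- ===== Notes on version B (the rewrite author's own statement) =====
-- stated objective: alternative
-- what changed: Replaces the two-pass scheme (min() over the whole list, then an index loop collecting matches) with a single pass that maintains the running minimum score and the list of matching tuples together, resetting the list when a smaller score appears.
-- outside the precondition, e.g. on bagmin2([]): A raises ValueError, B raises ValueError
import Mathlib
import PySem

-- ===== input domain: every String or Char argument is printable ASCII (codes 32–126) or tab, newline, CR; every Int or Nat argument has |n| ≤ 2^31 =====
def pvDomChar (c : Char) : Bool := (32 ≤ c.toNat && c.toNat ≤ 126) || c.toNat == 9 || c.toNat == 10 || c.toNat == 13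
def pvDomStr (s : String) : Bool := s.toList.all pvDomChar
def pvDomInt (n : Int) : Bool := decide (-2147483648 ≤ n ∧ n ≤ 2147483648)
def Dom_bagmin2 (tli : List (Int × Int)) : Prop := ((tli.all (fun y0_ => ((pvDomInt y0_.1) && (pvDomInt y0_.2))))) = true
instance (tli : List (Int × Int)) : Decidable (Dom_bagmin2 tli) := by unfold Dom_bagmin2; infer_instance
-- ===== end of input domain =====

-- B merges A's two passes (min() then a collecting index loop) into one pass that keeps
-- the running minimum score together with the list of matching tuples (alternative decomposition).


-- ===== PORT A =====
-- Python's 'a < b' on int pairs: lexicographic (exact port of tuple comparison)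
def pvLexLt (a b : Int × Int) : Bool := a.1 < b.1 || (a.1 == b.1 && a.2 < b.2)

def bagmin2 (tli : List (Int × Int)) : List (Int × Int) :=
  match tli with
  | [] => []  -- Python: min([]) raises ValueError; excluded by Pre_bagmin2
  | x :: t =>
    -- min(tli)[0]: Python min keeps the first extremal element, lexicographic on tuples
    let currentMin := (t.foldl (fun m y => if pvLexLt y m then y else m) x).1
    (x :: t).foldl (fun ret y => if currentMin == y.1 then ret ++ [y] else ret) []

-- ===== PORT B =====
def pvStep (st : Option Int × List (Int × Int)) (t : Int × Int) : Option Int × List (Int × Int) :=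
  match st.1 with
  | none => (some t.1, [t])
  | some b =>
    if t.1 < b then (some t.1, [t])
    else if t.1 == b then (st.1, st.2 ++ [t])
    else st

def bagmin2_alt (tli : List (Int × Int)) : List (Int × Int) :=
  -- Python B raises ValueError on []; that input is excluded by Pre_bagmin2
  (tli.foldl pvStep (none, [])).2

-- ===== PRECONDITION & SPEC =====
-- Pre_ excludes only the empty list, on which both Pythons raise ValueError (min of empty sequence).
def Pre_bagmin2 (tli : List (Int × Int)) : Prop := tli ≠ []
instance (tli : List (Int × Int)) : Decidable (Pre_bagmin2 tli) := by unfold Pre_bagmin2; infer_instance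
def pvWitness_bagmin2 : (List (Int × Int)) := [(2, 5), (1, 7), (1, 3)]

def Spec_bagmin2 (tli : List (Int × Int)) (out : List (Int × Int)) : Prop := out = bagmin2_alt tli
instance (tli : List (Int × Int)) (out : List (Int × Int)) : Decidable (Spec_bagmin2 tli out) := by unfold Spec_bagmin2; infer_instance

-- ===== CLAIM (what is proved, stated in full; the proofs are below) =====
def Claim_equal_bagmin2 : Prop := ∀ (tli : List (Int × Int)), Dom_bagmin2 tli → Pre_bagmin2 tli → Spec_bagmin2 tli (bagmin2 tli)

-- ===== LEMMAS AND PROOFS =====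

-- the first component of the lexicographic running min is the running min of first components
theorem pv_foldl_fst_min (t : List (Int × Int)) : ∀ (x : Int × Int),
    (t.foldl (fun m y => if pvLexLt y m then y else m) x).1
      = t.foldl (fun a y => min a y.1) x.1 := by
  induction t with
  | nil => intro x; rfl
  | cons y t ih =>
    intro x
    simp only [List.foldl_cons]
    rw [ih]
    have : ((if pvLexLt y x then y else x)).1 = min x.1 y.1 := by
      simp only [pvLexLt]
      split_ifs with h
      · simp only [Bool.or_eq_true, Bool.and_eq_true, decide_eq_true_eq, beq_iff_eq] at h
        rcases h with h | ⟨h, _⟩ <;> omega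
      · simp only [Bool.or_eq_true, Bool.and_eq_true, decide_eq_true_eq, beq_iff_eq,
          not_or, not_and] at h
        omega
    rw [this]

theorem pv_minfold_le (t : List (Int × Int)) : ∀ (b : Int),
    t.foldl (fun a y => min a y.1) b ≤ b := by
  induction t with
  | nil => intro b; simp
  | cons y t ih =>
    intro b
    simp only [List.foldl_cons]
    exact le_trans (ih _) (min_le_left _ _)

-- invariant of B's one-pass fold
theorem pv_Binv (t : List (Int × Int)) : ∀ (b : Int) (r : List (Int × Int)),
    t.foldl pvStep (some b, r)
      = (some (t.foldl (fun a y => min a y.1) b),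
         (if t.foldl (fun a y => min a y.1) b = b then r else [])
           ++ t.filter (fun y => y.1 == t.foldl (fun a y => min a y.1) b)) := by
  induction t with
  | nil => intro b r; simp
  | cons y t ih =>
    intro b r
    simp only [List.foldl_cons]
    have hm : t.foldl (fun a y => min a y.1) (min b y.1) ≤ min b y.1 := pv_minfold_le t _
    by_cases h1 : y.1 < b
    · have hstep : pvStep (some b, r) y = (some y.1, [y]) := by
        simp [pvStep, h1]
      rw [hstep, ih]
      have hb : min b y.1 = y.1 := by omega
      simp only [hb] at hm ⊢
      have hne : t.foldl (fun a y => min a y.1) y.1 ≠ b := by omega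
      simp only [List.filter_cons, hne]
      by_cases h2 : t.foldl (fun a y => min a y.1) y.1 = y.1
      · simp [h2]
      · have : (y.1 == t.foldl (fun a y => min a y.1) y.1) = false := by
          simp only [beq_eq_false_iff_ne, ne_eq]; omega
        simp [h2, this]
    · by_cases h2 : y.1 = b
      · have hstep : pvStep (some b, r) y = (some b, r ++ [y]) := by
          simp [pvStep, h2]
        rw [hstep, ih]
        have hb : min b y.1 = b := by omega
        simp only [hb] at hm ⊢
        by_cases h3 : t.foldl (fun a y => min a y.1) b = b
        · have : (y.1 == t.foldl (fun a y => min a y.1) b) = true := by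
            simp only [beq_iff_eq]; omega
          simp [h3, List.filter_cons, this, h2] <;> omega
        · have : (y.1 == t.foldl (fun a y => min a y.1) b) = false := by
            simp only [beq_eq_false_iff_ne, ne_eq]; omega
          simp [h3, List.filter_cons, this, h2] <;> omega
      · have h4 : b < y.1 := by omega
        have hstep : pvStep (some b, r) y = (some b, r) := by
          have hlt : (y.1 < b) = False := by simp; omega
          have heq : (y.1 == b) = false := by simp only [beq_eq_false_iff_ne, ne_eq]; omega
          simp [pvStep, hlt, heq]
        rw [hstep, ih]
        have hb : min b y.1 = b := by omega
        simp only [hb] at hm ⊢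
        have : (y.1 == t.foldl (fun a y => min a y.1) b) = false := by
          simp only [beq_eq_false_iff_ne, ne_eq]; omega
        simp [this]

-- ===== VERDICT (by name: the statement is the Claim_ definition above) =====
theorem bagmin2_spec : Claim_equal_bagmin2 := by
  intro tli _ hpre
  unfold Spec_bagmin2
  match tli with
  | [] => exact absurd rfl hpre
  | x :: t =>
    unfold bagmin2 bagmin2_alt
    simp only [List.foldl_cons]
    have hstep0 : pvStep (none, []) x = (some x.1, [x]) := rfl
    rw [hstep0, pv_Binv]
    set m := t.foldl (fun a y => min a y.1) x.1 with hmdef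
    have hmineq : (t.foldl (fun m y => if pvLexLt y m then y else m) x).1 = m :=
      pv_foldl_fst_min t x
    rw [hmineq]
    have hml : m ≤ x.1 := pv_minfold_le t x.1
    rw [PySem.List.foldl_append_if_eq_filter]
    simp only [List.nil_append]
    by_cases h : m = x.1
    · simp only [h, beq_self_eq_true, if_true, List.singleton_append]
      congr 1
      exact List.filter_congr (fun y _ => by by_cases hy : x.1 = y.1 <;> simp [hy, Ne.symm])
    · have h1 : (m == x.1) = false := by simpa using h
      simp only [h1, Bool.false_eq_true, if_false, if_neg h, List.nil_append]
      exact List.filter_congr (fun y _ => by by_cases hy : m = y.1 <;> simp [hy, Ne.symm])
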